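-- pv_equiv track=rewrite | github.com/gbusch/AdventOfCode | 2023/day13.py | find_mirror_single
-- ===== SOURCE A (Python) =====
-- def find_mirror_single(input: str) -> int:
--     """
--     >>> list(find_mirror_single('#.##..##.'))
--     [5, 7]
--     >>> list(find_mirror_single('##......#'))
--     [1, 5]
--     """
--     input_forw = list(input)
--     input_backw = list(input)[::-1]
--     for i in range(1, len(input_forw)):
--         forw = input_forw[i:min(2*i, len(input))]
--         backw = input_backw[len(input)-i:2*(len(input)-i)]
--         if forw == backw:
--             yield i
-- ===== SOURCE B (Python) =====
-- def find_mirror_single(input: str):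
--     # Manacher (even-length centers): d[i] = largest k with input[i-k:i] reversed == input[i:i+k].
--     s = input
--     n = len(s)
--     d = []
--     c, rad = 0, 0  # s[c-rad:c+rad] is the widest-reaching even palindrome window seen so far
--     for i in range(n):
--         k = min(d[2 * c - i], c + rad - i) if i < c + rad else 0
--         while k < i and i + k < n and s[i - k - 1] == s[i + k]:
--             k += 1
--         d.append(k)
--         if i + k > c + rad:
--             c, rad = i, k
--     for i in range(1, n):
--         if d[i] >= min(i, n - i):
--             yield i
-- ===== Notes on version B (the rewrite author's own statement) =====
-- stated objective: faster
-- what changed: A compares two freshly-built slices for every candidate axis (O(n) work per center); B runs Manacher's even-palindrome algorithm once to get every center's reflection radius in O(n) total and then reads the axes off the radius array.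
import Mathlib
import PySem

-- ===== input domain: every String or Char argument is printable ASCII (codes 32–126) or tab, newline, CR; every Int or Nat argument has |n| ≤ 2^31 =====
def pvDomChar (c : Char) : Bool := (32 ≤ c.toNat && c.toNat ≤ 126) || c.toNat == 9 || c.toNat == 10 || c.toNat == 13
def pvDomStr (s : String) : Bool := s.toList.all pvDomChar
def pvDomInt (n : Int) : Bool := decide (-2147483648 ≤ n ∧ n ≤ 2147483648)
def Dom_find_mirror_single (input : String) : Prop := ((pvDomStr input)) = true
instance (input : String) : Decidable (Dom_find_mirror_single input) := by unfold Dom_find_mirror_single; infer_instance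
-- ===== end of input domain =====

-- B replaces A's per-center O(n) slice comparisons by Manacher's even-palindrome radii (O(n) total); equivalence proved for all inputs.

-- ===== PORT A =====
def find_mirror_single (input : String) : List Int :=
  let input_forw := input.toList
  let input_backw := (PySem.List.slice? input.toList none none (-1)).getD []
  let n : Int := PySem.List.len input_forw
  (PySem.List.pyRange 1 n 1).foldl (fun acc i =>
    let forw := PySem.List.slice input_forw (some i) (some (min (2*i) n))
    let backw := PySem.List.slice input_backw (some (n - i)) (some (2*(n - i)))
    if forw = backw then acc ++ [i] else acc) []

-- ===== PORT B =====
-- the 'while k < i and i+k < n and s[i-k-1] == s[i+k]: k += 1' loop of Source B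
def pvExpand (s : List Char) (i k : Nat) : Nat :=
  if h : k < i ∧ i + k < s.length ∧ s.getD (i - k - 1) ' ' = s.getD (i + k) ' ' then
    pvExpand s i (k + 1)
  else k
termination_by i - k
decreasing_by omega

-- one iteration of Source B's main 'for i in range(n)' loop; state = (d, (c, rad))
def pvStep (s : List Char) (st : List Nat × Nat × Nat) (i : Nat) : List Nat × Nat × Nat :=
  let d := st.1
  let c := st.2.1
  let rad := st.2.2
  let k0 := if i < c + rad then min (d.getD (2*c - i) 0) (c + rad - i) else 0
  let k := pvExpand s i k0
  (d ++ [k], if c + rad < i + k then (i, k) else (c, rad))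

def find_mirror_single_alt (input : String) : List Int :=
  let s := input.toList
  let n := s.length
  let d := ((List.range n).foldl (pvStep s) ([], 0, 0)).1
  (List.range n).filterMap (fun i =>
    if 1 ≤ i ∧ min i (n - i) ≤ d.getD i 0 then some ((i : Int)) else none)

-- ===== PRECONDITION & SPEC =====
def Spec_find_mirror_single (input : String) (out : List Int) : Prop := out = find_mirror_single_alt input
instance (input : String) (out : List Int) : Decidable (Spec_find_mirror_single input out) := by unfold Spec_find_mirror_single; infer_instance

-- ===== CLAIM (what is proved, stated in full; the proofs are below) =====
def Claim_equal_find_mirror_single : Prop := ∀ (input : String), Dom_find_mirror_single input → Spec_find_mirror_single input (find_mirror_single input)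

-- ===== LEMMAS AND PROOFS =====

-- 'mirror axis at i with radius k': the k characters right of position i mirror the k before it
def Good (s : List Char) (i k : Nat) : Prop :=
  k ≤ i ∧ i + k ≤ s.length ∧ ∀ j < k, s.getD (i + j) ' ' = s.getD (i - 1 - j) ' '

theorem good_mono {s : List Char} {i k : Nat} (h : Good s i k) {j : Nat} (hj : j ≤ k) :
    Good s i j := by
  obtain ⟨h1, h2, h3⟩ := h
  exact ⟨by omega, by omega, fun m hm => h3 m (by omega)⟩

theorem good_zero {s : List Char} {i : Nat} (hi : i ≤ s.length) : Good s i 0 :=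
  ⟨Nat.zero_le _, by omega, by omega⟩

theorem pvExpand_spec {s : List Char} {i k : Nat} (hk : Good s i k) :
    Good s i (pvExpand s i k) ∧ ¬ Good s i (pvExpand s i k + 1) := by
  unfold pvExpand
  split
  · next h =>
    obtain ⟨h1, h2, h3⟩ := h
    refine pvExpand_spec ?_
    obtain ⟨g1, g2, g3⟩ := hk
    refine ⟨by omega, by omega, fun j hj => ?_⟩
    rcases Nat.lt_or_ge j k with hjk | hjk
    · exact g3 j hjk
    · have : j = k := by omega
      subst this
      have : i - 1 - j = i - j - 1 := by omega
      rw [this]; exact h3.symm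
  · next h =>
    refine ⟨hk, fun hg => h ?_⟩
    obtain ⟨g1, g2, g3⟩ := hg
    refine ⟨by omega, by omega, ?_⟩
    have := g3 k (by omega)
    have e : i - 1 - k = i - k - 1 := by omega
    rw [e] at this; exact this.symm
termination_by i - k
decreasing_by omega

theorem good_iff_le {s : List Char} {i d : Nat} (hmax : Good s i d ∧ ¬ Good s i (d + 1))
    {L : Nat} : Good s i L ↔ L ≤ d := by
  constructor
  · intro hg
    by_contra hlt
    exact hmax.2 (good_mono hg (by omega))
  · intro hle
    exact good_mono hmax.1 hle

-- the Manacher symmetry step: a radius at the mirrored center transfers inside the window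
theorem good_mirror {s : List Char} {c rad i k : Nat} (hw : Good s c rad) (hci : c ≤ i)
    (hir : i < c + rad) (hm : Good s (2*c - i) k) (hk : k ≤ c + rad - i) : Good s i k := by
  obtain ⟨w1, w2, w3⟩ := hw
  obtain ⟨m1, m2, m3⟩ := hm
  refine ⟨by omega, by omega, fun j hj => ?_⟩
  -- window symmetry at position i+j:  s[i+j] = s[2c-1-(i+j)] = s[(2c-i)-1-j]
  have e1 : s.getD (i + j) ' ' = s.getD (2*c - i - 1 - j) ' ' := by
    have := w3 (i - c + j) (by omega)
    have ea : c + (i - c + j) = i + j := by omega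
    have eb : c - 1 - (i - c + j) = 2*c - i - 1 - j := by omega
    rw [ea, eb] at this; exact this
  -- radius at the mirrored center 2c-i:  s[(2c-i)+j] = s[(2c-i)-1-j]
  have e2 : s.getD (2*c - i + j) ' ' = s.getD (2*c - i - 1 - j) ' ' := by
    have := m3 j hj
    have ea : 2*c - i - 1 - j = 2*c - i - 1 - j := rfl
    have eb : (2*c - i) - 1 - j = 2*c - i - 1 - j := by omega
    rw [eb] at this; exact this
  -- window symmetry at position (2c-i)+j:  s[(2c-i)+j] = s[2c-1-((2c-i)+j)] = s[i-1-j]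
  have e3 : s.getD (2*c - i + j) ' ' = s.getD (i - 1 - j) ' ' := by
    rcases Nat.lt_or_ge (2*c - i + j) c with hlt | hge
    · have := w3 (c - 1 - (2*c - i + j)) (by omega)
      have ea : c + (c - 1 - (2*c - i + j)) = i - 1 - j := by omega
      have eb : c - 1 - (c - 1 - (2*c - i + j)) = 2*c - i + j := by omega
      rw [ea, eb] at this; exact this.symm
    · have := w3 (2*c - i + j - c) (by omega)
      have ea : c + (2*c - i + j - c) = 2*c - i + j := by omega
      have eb : c - 1 - (2*c - i + j - c) = i - 1 - j := by omega
      rw [ea, eb] at this; exact this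
  rw [e1, ← e2, e3]

def GoodMax (s : List Char) (i d : Nat) : Prop := Good s i d ∧ ¬ Good s i (d + 1)

-- invariant of Source B's main loop after the first i iterations
def LoopInv (s : List Char) (st : List Nat × Nat × Nat) (i : Nat) : Prop :=
  st.1.length = i ∧ (∀ j < i, GoodMax s j (st.1.getD j 0)) ∧ Good s st.2.1 st.2.2 ∧
    (st.2.1 < i ∨ (st.2.1 = 0 ∧ st.2.2 = 0))

theorem pvStep_inv {s : List Char} {st : List Nat × Nat × Nat} {i : Nat}
    (hinv : LoopInv s st i) (hi : i < s.length) : LoopInv s (pvStep s st i) (i + 1) := by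
  obtain ⟨d, c, rad⟩ := st
  obtain ⟨hlen, hgm, hwin, hc⟩ := hinv
  simp only at hlen hgm hwin hc
  set k0 := (if i < c + rad then min (d.getD (2*c - i) 0) (c + rad - i) else 0) with hk0def
  have hk0 : Good s i k0 := by
    rw [hk0def]
    split
    · next hguard =>
      have hci : c < i := by
        rcases hc with h | ⟨h1, h2⟩
        · exact h
        · omega
      have hradc : rad ≤ c := hwin.1
      have hm : GoodMax s (2*c - i) (d.getD (2*c - i) 0) := hgm _ (by omega)
      exact good_mirror hwin (by omega) hguard
        (good_mono hm.1 (Nat.min_le_left _ _)) (Nat.min_le_right _ _)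
    · exact good_zero (by omega)
  have hexp := pvExpand_spec hk0
  set k := pvExpand s i k0 with hkdef
  have hstep : pvStep s (d, c, rad) i = (d ++ [k], if c + rad < i + k then (i, k) else (c, rad)) := rfl
  rw [hstep]
  have hd' : ∀ j < i + 1, GoodMax s j ((d ++ [k]).getD j 0) := by
    intro j hj
    rcases Nat.lt_or_ge j i with hji | hji
    · rw [List.getD_append d [k] 0 j (hlen ▸ hji)]
      exact hgm j hji
    · have hje : j = i := by omega
      subst hje
      have : (d ++ [k]).getD j 0 = k := by
        rw [← hlen]; simp [List.getD]
      rw [this]; exact hexp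
  by_cases hup : c + rad < i + k
  · rw [if_pos hup]
    exact ⟨by show (d ++ [k]).length = i + 1; simp [hlen], hd', hexp.1,
      by left; show i < i + 1; omega⟩
  · rw [if_neg hup]
    refine ⟨by show (d ++ [k]).length = i + 1; simp [hlen], hd', hwin, ?_⟩
    rcases hc with h | h
    · left; show c < i + 1; omega
    · right; exact h

theorem fold_inv (s : List Char) (n : Nat) (hn : n ≤ s.length) :
    LoopInv s ((List.range n).foldl (pvStep s) ([], 0, 0)) n := by
  induction n with
  | zero =>
    simp only [List.range_zero, List.foldl_nil]
    refine ⟨rfl, by omega, good_zero (by omega), Or.inr ⟨rfl, rfl⟩⟩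
  | succ m ih =>
    rw [List.range_succ, List.foldl_append, List.foldl_cons, List.foldl_nil]
    exact pvStep_inv (ih (by omega)) (by omega)

-- a = b for equal-length lists iff elementwise
theorem listEqIff (a b : List Char) (h : a.length = b.length) :
    a = b ↔ ∀ (j : Nat) (h1 : j < a.length) (h2 : j < b.length), a[j] = b[j] := by
  constructor
  · intro he j h1 h2; subst he; rfl
  · intro he; exact List.ext_getElem h he

theorem filterMap_if_eq_map_filter (l : List Nat) (p : Nat → Prop) [DecidablePred p] (f : Nat → Int) :
    List.filterMap (fun i => if p i then some (f i) else none) l =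
      (l.filter (fun i => decide (p i))).map f := by
  induction l with
  | nil => rfl
  | cons a t ih => by_cases h : p a <;> simp [h, ih]

-- A's slice test at center i is exactly Good s i (min i (n-i))
theorem sliceA_iff (s : List Char) (i : Nat) (h1 : 1 ≤ i) (h2 : i < s.length) :
    (PySem.List.slice s (some (i : Int)) (some (min (2*(i:Int)) (s.length : Int))) =
      PySem.List.slice s.reverse (some ((s.length : Int) - i)) (some (2*((s.length : Int) - i)))) ↔
    Good s i (min i (s.length - i)) := by
  have hc1 : min (2*(i:Int)) (s.length : Int) = ((min (2*i) s.length : Nat) : Int) := by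
    push_cast; rfl
  have hc2 : (s.length : Int) - i = ((s.length - i : Nat) : Int) := by
    push_cast [Nat.cast_sub (le_of_lt h2)]; ring
  have hc3 : 2*(((s.length - i : Nat) : Int)) = ((2*(s.length - i) : Nat) : Int) := by
    push_cast; ring
  rw [hc1, hc2, hc3, PySem.List.slice_natCast, PySem.List.slice_natCast]
  have e1 : min (2*i) s.length - i = min i (s.length - i) := by omega
  have e2 : 2*(s.length - i) - (s.length - i) = s.length - i := by omega
  rw [e1, e2]
  have lenF : ((s.drop i).take (min i (s.length - i))).length = min i (s.length - i) := by
    rw [List.length_take, List.length_drop]; omega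
  have lenB : ((s.reverse.drop (s.length - i)).take (s.length - i)).length = min i (s.length - i) := by
    rw [List.length_take, List.length_drop, List.length_reverse]; omega
  rw [listEqIff _ _ (by rw [lenF, lenB])]
  have hgood : Good s i (min i (s.length - i)) ↔
      ∀ j < min i (s.length - i), s.getD (i + j) ' ' = s.getD (i - 1 - j) ' ' :=
    ⟨fun h => h.2.2, fun h => ⟨by omega, by omega, h⟩⟩
  rw [hgood]
  have hF : ∀ (j : Nat) (hj : j < min i (s.length - i)),
      ((s.drop i).take (min i (s.length - i)))[j]'(by rw [lenF]; exact hj) =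
        s[i + j]'(by omega) := by
    intro j hj
    simp [List.getElem_take, List.getElem_drop, Nat.add_comm i j]
  have hB : ∀ (j : Nat) (hj : j < min i (s.length - i)),
      ((s.reverse.drop (s.length - i)).take (s.length - i))[j]'(by rw [lenB]; exact hj) =
        s[i - 1 - j]'(by omega) := by
    intro j hj
    have hrev : (s.reverse)[(s.length - i) + j]'(by simp; omega) =
        s[s.length - 1 - ((s.length - i) + j)]'(by omega) :=
      List.getElem_reverse _
    have hidx : s.length - 1 - ((s.length - i) + j) = i - 1 - j := by omega
    simp only [List.getElem_take, List.getElem_drop]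
    rw [hrev]
    exact getElem_congr rfl hidx (by omega)
  constructor
  · intro h j hj
    have := h j (by rw [lenF]; exact hj) (by rw [lenB]; exact hj)
    rw [hF j hj, hB j hj] at this
    rw [List.getD_eq_getElem s ' ' (by omega), List.getD_eq_getElem s ' ' (by omega)]
    exact this
  · intro h j hj1 hj2
    have hj : j < min i (s.length - i) := by rw [lenF] at hj1; exact hj1
    rw [hF j hj, hB j hj]
    have := h j hj
    rw [List.getD_eq_getElem s ' ' (by omega), List.getD_eq_getElem s ' ' (by omega)] at this
    exact this

theorem ports_eq (input : String) : find_mirror_single input = find_mirror_single_alt input := by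
  unfold find_mirror_single find_mirror_single_alt
  simp only [PySem.List.slice?_none_none_neg_one, Option.getD_some, PySem.List.len_eq]
  set s := input.toList with hs
  set n := s.length with hn
  have hinv := fold_inv s n (le_refl _)
  set d := ((List.range n).foldl (pvStep s) ([], 0, 0)).1 with hd
  obtain ⟨-, hgm, -, -⟩ := hinv
  rw [PySem.List.foldl_append_ite_eq_filter]
  rw [filterMap_if_eq_map_filter]
  simp only [List.nil_append]
  rw [PySem.List.pyRange_one]
  have hnn : ((n : Int) - 1).toNat = n - 1 := by omega
  rw [hnn, List.filter_map]
  cases hcase : n with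
  | zero => simp
  | succ m =>
    have hm1 : m + 1 - 1 = m := rfl
    rw [hm1, List.range_succ_eq_map]
    rw [List.filter_cons_of_neg (by simp)]
    rw [List.filter_map, List.map_map]
    have hfil : ∀ k ∈ List.range m,
        ((fun x => decide (PySem.List.slice s (some x) (some (min (2*x) ((m+1 : Nat):Int))) =
            PySem.List.slice s.reverse (some (((m+1 : Nat):Int) - x)) (some (2*(((m+1 : Nat):Int) - x))))) ∘
          (fun k : Nat => (1:Int) + k)) k =
        ((fun i => decide (1 ≤ i ∧ min i (m + 1 - i) ≤ d.getD i 0)) ∘ Nat.succ) k := by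
      intro k hk
      have hkm : k < m := List.mem_range.mp hk
      simp only [Function.comp]
      apply decide_eq_decide.mpr
      have hcast : (1:Int) + (k:Nat) = (((k+1 : Nat)) : Int) := by push_cast; ring
      rw [hcast]
      have hlen : s.length = m + 1 := by omega
      rw [show ((m+1 : Nat):Int) = (s.length : Int) by rw [hlen], sliceA_iff s (k+1) (by omega) (by omega), hlen]
      have hb := good_iff_le (hgm (k+1) (by omega))
        (L := min (k+1) (m + 1 - (k+1)))
      rw [hb]
      constructor
      · intro h; exact ⟨by omega, h⟩
      · intro h; exact h.2
    rw [List.filter_congr hfil]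
    apply List.map_congr_left
    intro k hk
    simp only [Function.comp]
    push_cast
    ring
-- ===== VERDICT (by name: the statement is the Claim_ definition above) =====
theorem find_mirror_single_spec : Claim_equal_find_mirror_single := by
  intro input _
  unfold Spec_find_mirror_single
  exact ports_eq input
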